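-- pv_equiv track=rewrite | github.com/loofahss/mgnify | pys/sp_feature_extraction.py | find_h_region
-- ===== SOURCE A (Python) =====
-- HYDROPHOBIC_AA = set("AILMFWVY")
--
-- def find_h_region(seq):
--     """找最长连续疏水区"""
--     max_start, max_end = -1, -1
--     current_start = None
--
--     for i, aa in enumerate(seq):
--         if aa in HYDROPHOBIC_AA:
--             if current_start is None:
--                 current_start = i
--         else:
--             if current_start is not None:
--                 if (i - current_start) > (max_end - max_start):
--                     max_start, max_end = current_start, i
--                 current_start = None
--
--     # 收尾
--     if current_start is not None:
--         if (len(seq) - current_start) > (max_end - max_start):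
--             max_start, max_end = current_start, len(seq)
--
--     return max_start, max_end
-- ===== SOURCE B (Python) =====
-- HYDROPHOBIC_AA = set("AILMFWVY")
--
-- def find_h_region(seq):
--     """Runs-first: list break positions (non-hydrophobic indices plus sentinels),
--     then scan consecutive break pairs for the longest gap."""
--     n = len(seq)
--     breaks = [-1] + [i for i, aa in enumerate(seq) if aa not in HYDROPHOBIC_AA] + [n]
--     best = (-1, -1)
--     for a, b in zip(breaks, breaks[1:]):
--         if b - (a + 1) > best[1] - best[0]:
--             best = (a + 1, b)
--     return best
-- ===== Notes on version B (the rewrite author's own statement) =====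
-- stated objective: alternative
-- what changed: Replaces A's open/close state machine with trailing cleanup by a runs-first pass: collect the non-hydrophobic break indices (with -1 and len(seq) sentinels) and scan consecutive break pairs for the widest gap.
import Mathlib
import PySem

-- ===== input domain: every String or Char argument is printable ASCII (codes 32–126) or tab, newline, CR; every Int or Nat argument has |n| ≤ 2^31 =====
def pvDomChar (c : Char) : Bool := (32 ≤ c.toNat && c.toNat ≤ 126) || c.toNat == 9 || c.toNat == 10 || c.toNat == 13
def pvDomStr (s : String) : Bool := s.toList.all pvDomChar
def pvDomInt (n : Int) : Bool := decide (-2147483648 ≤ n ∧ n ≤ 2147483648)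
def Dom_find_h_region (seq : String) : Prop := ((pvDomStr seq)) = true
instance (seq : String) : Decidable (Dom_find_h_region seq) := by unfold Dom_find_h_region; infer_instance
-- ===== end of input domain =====

-- B replaces A's open/close state machine with a runs-first pass over break indices; alternative (same cost), equal return value proved on all inputs.

-- ===== PORT A =====
def pvHydro : PySem.Set Char := PySem.Set.ofList "AILMFWVY".toList

-- A's loop body (one enumerate step) and the trailing cleanup, as named helpers
def stepA (s : Int × Int × Option Int) (p : Int × Char) : Int × Int × Option Int :=
  match s with
  | (max_start, max_end, current_start) =>
    if pvHydro.contains p.2 then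
      match current_start with
      | none => (max_start, max_end, some p.1)
      | some _ => (max_start, max_end, current_start)
    else
      match current_start with
      | some cs =>
        if p.1 - cs > max_end - max_start then (cs, p.1, none)
        else (max_start, max_end, none)
      | none => (max_start, max_end, none)

def finishA (n : Int) (s : Int × Int × Option Int) : Int × Int :=
  match s with
  | (max_start, max_end, current_start) =>
    match current_start with
    | some cs => if n - cs > max_end - max_start then (cs, n) else (max_start, max_end)
    | none => (max_start, max_end)

def find_h_region (seq : String) : Int × Int :=
  finishA (seq.toList.length : Int)
    ((PySem.List.enumerate seq.toList 0).foldl stepA (-1, -1, none))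

-- ===== PORT B =====
-- B's loop body over a consecutive pair of breaks
def stepB (best : Int × Int) (ab : Int × Int) : Int × Int :=
  if ab.2 - (ab.1 + 1) > best.2 - best.1 then (ab.1 + 1, ab.2) else best

def pvBreaks (l : List Char) : List Int :=
  [-1] ++ ((PySem.List.enumerate l 0).filter (fun p => !(pvHydro.contains p.2))).map (fun p => p.1)
       ++ [(l.length : Int)]

def find_h_region_alt (seq : String) : Int × Int :=
  ((pvBreaks seq.toList).zip (pvBreaks seq.toList).tail).foldl stepB (-1, -1)

-- ===== PRECONDITION & SPEC =====
def Spec_find_h_region (seq : String) (out : Int × Int) : Prop := out = find_h_region_alt seq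
instance (seq : String) (out : Int × Int) : Decidable (Spec_find_h_region seq out) := by unfold Spec_find_h_region; infer_instance

-- ===== CLAIM (what is proved, stated in full; the proofs are below) =====
def Claim_equal_find_h_region : Prop := ∀ (seq : String), Dom_find_h_region seq → Spec_find_h_region seq (find_h_region seq)

-- ===== LEMMAS AND PROOFS =====

-- B's zip-fold, rephrased as a recursion carrying the previous break
def gB (prev : Int) (bs : List Int) (best : Int × Int) : Int × Int :=
  match bs with
  | [] => best
  | b :: rest => gB b rest (stepB best (prev, b))

lemma zip_fold_eq_gB (bs : List Int) : ∀ (prev : Int) (best : Int × Int),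
    (((prev :: bs).zip bs).foldl stepB best) = gB prev bs best := by
  induction bs with
  | nil => intro prev best; rfl
  | cons b rest ih =>
    intro prev best
    simpa [List.zip, gB] using ih b (stepB best (prev, b))

-- the break list of the suffix enumerated from i, with the trailing sentinel
def bks (l : List Char) (i : Int) : List Int :=
  ((PySem.List.enumerate l i).filter (fun p => !(pvHydro.contains p.2))).map (fun p => p.1)
    ++ [i + (l.length : Int)]

-- the previous break corresponding to A's state at index i
def prevOf (i : Int) : Option Int → Int
  | none => i - 1
  | some c => c - 1

lemma main_inv (l : List Char) : ∀ (i ms me : Int) (cur : Option Int), ms ≤ me →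
    finishA (i + (l.length : Int)) ((PySem.List.enumerate l i).foldl stepA (ms, me, cur))
      = gB (prevOf i cur) (bks l i) (ms, me) := by
  induction l with
  | nil =>
    intro i ms me cur h
    cases cur with
    | none =>
      simp only [PySem.List.enumerate_nil, List.foldl_nil, bks, List.filter_nil, List.map_nil,
        List.nil_append, List.length_nil, Nat.cast_zero, add_zero, gB, finishA, stepB, prevOf]
      split_ifs <;> rw [Prod.mk.injEq] <;> exact ⟨by omega, by omega⟩
    | some cs =>
      simp only [PySem.List.enumerate_nil, List.foldl_nil, bks, List.filter_nil, List.map_nil,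
        List.nil_append, List.length_nil, Nat.cast_zero, add_zero, gB, finishA, stepB, prevOf]
      split_ifs <;> rw [Prod.mk.injEq] <;> exact ⟨by omega, by omega⟩
  | cons c l ih =>
    intro i ms me cur h
    have hlen : i + ((c :: l).length : Int) = (i + 1) + (l.length : Int) := by
      simp; omega
    rw [PySem.List.enumerate_cons, List.foldl_cons, hlen]
    by_cases hc : c ∈ pvHydro
    · -- hydrophobic: break list unchanged
      have hbks : bks (c :: l) i = bks l (i + 1) := by
        simp [bks, PySem.List.enumerate_cons, hc]
        omega
      cases cur with
      | none =>
        rw [show stepA (ms, me, none) (i, c) = (ms, me, some i) by simp [stepA, hc]]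
        rw [ih (i + 1) ms me (some i) h, hbks]
        rfl
      | some cs =>
        rw [show stepA (ms, me, some cs) (i, c) = (ms, me, some cs) by simp [stepA, hc]]
        rw [ih (i + 1) ms me (some cs) h, hbks]
        rfl
    · -- non-hydrophobic: i is a break
      have hbks : bks (c :: l) i = i :: bks l (i + 1) := by
        simp [bks, PySem.List.enumerate_cons, hc]
        omega
      have hprev : prevOf (i + 1) (none : Option Int) = i := by simp [prevOf]
      cases cur with
      | none =>
        rw [show stepA (ms, me, none) (i, c) = (ms, me, none) by simp [stepA, hc]]
        rw [ih (i + 1) ms me none h, hbks, hprev]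
        show gB i _ _ = gB i _ (stepB (ms, me) (i - 1, i))
        rw [show stepB (ms, me) (i - 1, i) = (ms, me) by simp [stepB]; omega]
      | some cs =>
        rw [show stepA (ms, me, some cs) (i, c)
              = (if i - cs > me - ms then (cs, i, none) else (ms, me, none)) by
            simp [stepA, hc]]
        rw [hbks]
        show _ = gB (cs - 1) (i :: bks l (i+1)) (ms, me)
        by_cases hup : i - cs > me - ms
        · rw [if_pos hup, ih (i + 1) cs i none (by omega), hprev]
          show gB i _ (cs, i) = gB i _ (stepB (ms, me) (cs - 1, i))
          rw [show stepB (ms, me) (cs - 1, i) = (cs, i) by simp [stepB]; omega]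
        · rw [if_neg hup, ih (i + 1) ms me none h, hprev]
          show gB i _ (ms, me) = gB i _ (stepB (ms, me) (cs - 1, i))
          rw [show stepB (ms, me) (cs - 1, i) = (ms, me) by simp [stepB]; omega]

-- ===== VERDICT (by name: the statement is the Claim_ definition above) =====
theorem find_h_region_spec : Claim_equal_find_h_region := by
  intro seq _
  show find_h_region seq = find_h_region_alt seq
  have h := main_inv seq.toList 0 (-1) (-1) none (le_refl _)
  simp only [zero_add] at h
  unfold find_h_region find_h_region_alt
  rw [h]
  rw [show pvBreaks seq.toList = (-1) :: bks seq.toList 0 by simp [pvBreaks, bks]]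
  rw [List.tail_cons, zip_fold_eq_gB]
  rfl
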